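-- pv_equiv track=rewrite | github.com/testingrfp0-byte/RFp | app/services/llm_services/llm_service.py | bump_version
-- ===== SOURCE A (Python) =====
-- def bump_version(version: str) -> str:
--     if not isinstance(version, str) or not version.strip():
--         return None
--
--     parts = version.strip().split(".")
--
--     if not all(p.isdigit() for p in parts):
--         return None
--
--     if len(parts) == 1:
--         (major,) = map(int, parts)
--         return str(major + 1)
--
--     if len(parts) == 2:
--         major, minor = map(int, parts)
--         return f"{major}.{minor + 1}"
--
--     if len(parts) == 3:
--         major, minor, patch = map(int, parts)
--         return f"{major}.{minor}.{patch + 1}"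
--
--     return None
-- ===== SOURCE B (Python) =====
-- def _bump(s, budget):
--     if budget == 0:
--         return None
--     pieces = s.split(".", 1)
--     if len(pieces) == 1:
--         return str(int(s) + 1) if s.isdigit() else None
--     head, tail = pieces
--     if not head.isdigit():
--         return None
--     rest = _bump(tail, budget - 1)
--     return None if rest is None else str(int(head)) + "." + rest
--
--
-- def bump_version(version: str) -> str:
--     if not isinstance(version, str):
--         return None
--     s = version.strip()
--     if not s:
--         return None
--     return _bump(s, 3)
-- ===== Notes on version B (the rewrite author's own statement) =====
-- stated objective: alternative
-- what changed: Replaces A's full split + all()-isdigit prepass + three per-length unpack/format branches by a recursive descent that splits off one component at a time with split('.', 1) under a depth budget of 3, validating, converting and formatting one component per step.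
import Mathlib
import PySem

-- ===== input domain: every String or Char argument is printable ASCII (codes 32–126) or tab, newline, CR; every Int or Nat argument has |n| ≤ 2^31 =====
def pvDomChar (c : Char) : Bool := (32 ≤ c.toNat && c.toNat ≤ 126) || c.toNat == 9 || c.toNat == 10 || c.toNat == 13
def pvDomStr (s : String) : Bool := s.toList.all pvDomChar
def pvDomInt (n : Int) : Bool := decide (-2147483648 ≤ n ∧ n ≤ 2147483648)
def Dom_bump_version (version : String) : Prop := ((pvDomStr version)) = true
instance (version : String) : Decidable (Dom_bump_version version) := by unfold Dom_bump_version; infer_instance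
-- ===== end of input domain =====

-- B replaces A's flat split / all-isdigit pass / three per-length unpack branches by a
-- recursive descent on the first '.' (split(".", 1) with a depth budget), validating and
-- formatting one component per step (objective: alternative). Return values are equal;
-- neither program mutates its argument.

-- int(p): both programs call int only on strings their isdigit guard accepted, so the
-- `none` case of PySem.Int.ofStr?/ofChars? is unreachable in both ports.
def pvPyInt (p : String) : Int := (PySem.Int.ofStr? p).getD 0
def pvPyIntC (p : List Char) : Int := (PySem.Int.ofChars? p).getD 0

-- ===== PORT A =====
def bump_version (version : String) : Option String :=
  if PySem.Str.strip version = "" then none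
  else
    let parts : List String := (PySem.Str.split? (PySem.Str.strip version) ".").getD []
    if !(parts.all PySem.Str.strIsdigit) then none
    else if parts.length = 1 then
      match parts.map pvPyInt with
      | [major] => some (PySem.Int.toStr (major + 1))
      | _ => none  -- unreachable (length = 1)
    else if parts.length = 2 then
      match parts.map pvPyInt with
      | [major, minor] =>
          some (PySem.Str.join "." [PySem.Int.toStr major, PySem.Int.toStr (minor + 1)])
      | _ => none  -- unreachable (length = 2)
    else if parts.length = 3 then
      match parts.map pvPyInt with
      | [major, minor, patch] =>
          some (PySem.Str.join "." [PySem.Int.toStr major, PySem.Int.toStr minor,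
                                    PySem.Int.toStr (patch + 1)])
      | _ => none  -- unreachable (length = 3)
    else none

-- ===== PORT B =====
-- _bump(s, budget): recursion on the budget (Python counts it 3, 2, 1, 0).
def bump_rec : List Char → Nat → Option (List Char)
  | _, 0 => none
  | s, b + 1 =>
    let pieces := PySem.Chars.splitOnMax s ['.'] 1   -- s.split(".", 1)
    if pieces.length = 1 then
      if PySem.Chars.strIsdigit s then some (PySem.Int.toChars (pvPyIntC s + 1)) else none
    else
      match pieces with                              -- head, tail = pieces
      | [] => none      -- unreachable: split(".", 1) yields 1 or 2 pieces
      | [_] => none     -- unreachable: the length-1 case was taken above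
      | head :: tail :: _ =>
          if PySem.Chars.strIsdigit head then
            match bump_rec tail b with
            | some rest => some (PySem.Int.toChars (pvPyIntC head) ++ '.' :: rest)
            | none => none
          else none

def bump_version_alt (version : String) : Option String :=
  let s := PySem.Str.strip version
  if s = "" then none
  else Option.map String.ofList (bump_rec s.toList 3)

-- ===== PRECONDITION & SPEC =====
def Spec_bump_version (version : String) (out : Option String) : Prop := out = bump_version_alt version
instance (version : String) (out : Option String) : Decidable (Spec_bump_version version out) := by unfold Spec_bump_version; infer_instance

-- ===== CLAIM (what is proved, stated in full; the proofs are below) =====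
def Claim_equal_bump_version : Prop := ∀ (version : String), Dom_bump_version version → Spec_bump_version version (bump_version version)

-- ===== LEMMAS AND PROOFS =====

-- Splitting on '.' with no limit, one chunk accumulated in front.
def auxSplit : List Char → List Char → List (List Char)
  | pre, [] => [pre]
  | pre, c :: rest => if c = '.' then pre :: auxSplit [] rest else auxSplit (pre ++ [c]) rest

-- Splitting on the FIRST '.' only (maxsplit = 1), one chunk accumulated in front.
def aux1 : List Char → List Char → List (List Char)
  | pre, [] => [pre]
  | pre, c :: rest => if c = '.' then [pre, rest] else aux1 (pre ++ [c]) rest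

theorem auxSplit_dot (pre rest : List Char) :
    auxSplit pre ('.' :: rest) = pre :: auxSplit [] rest := if_pos rfl

theorem auxSplit_ne (pre : List Char) (c : Char) (rest : List Char) (hc : c ≠ '.') :
    auxSplit pre (c :: rest) = auxSplit (pre ++ [c]) rest := if_neg hc

theorem aux1_dot (pre rest : List Char) :
    aux1 pre ('.' :: rest) = [pre, rest] := if_pos rfl

theorem aux1_ne (pre : List Char) (c : Char) (rest : List Char) (hc : c ≠ '.') :
    aux1 pre (c :: rest) = aux1 (pre ++ [c]) rest := if_neg hc

theorem auxSplit_ne_nil (pre s : List Char) : auxSplit pre s ≠ [] := by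
  induction s generalizing pre with
  | nil => simp [auxSplit]
  | cons c rest ih =>
      by_cases hc : c = '.'
      · subst hc; rw [auxSplit_dot]; simp
      · rw [auxSplit_ne _ _ _ hc]; exact ih _

theorem go_splitOn : ∀ (fuel : Nat) (l cur : List Char) (acc : List (List Char)),
    l.length < fuel →
    PySem.Chars.splitOn.go ['.'] fuel l cur acc = acc.reverse ++ auxSplit cur.reverse l := by
  intro fuel
  induction fuel with
  | zero => intro l cur acc h; omega
  | succ n ih =>
      intro l cur acc h
      cases l with
      | nil => simp [PySem.Chars.splitOn.go, auxSplit]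
      | cons c rest =>
          simp only [PySem.Chars.splitOn.go, List.isPrefixOf, Bool.and_true]
          by_cases hc : c = '.'
          · subst hc
            simp only [beq_self_eq_true, if_true, List.length_cons, List.length_nil,
              List.drop_succ_cons, List.drop_zero]
            rw [ih rest [] (cur.reverse :: acc) (by simpa using Nat.lt_of_succ_lt_succ h)]
            rw [auxSplit_dot]
            simp
          · have hbc : ('.' == c) = false := beq_eq_false_iff_ne.mpr (Ne.symm hc)
            simp only [hbc]
            rw [ih rest (c :: cur) acc (Nat.lt_of_succ_lt_succ h)]
            rw [auxSplit_ne _ _ _ hc]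
            simp

theorem splitOn_eq (s : List Char) :
    PySem.Chars.splitOn s ['.'] = auxSplit [] s := by
  unfold PySem.Chars.splitOn
  simpa using go_splitOn (s.length + 1) s [] [] (by omega)

theorem go_max0 : ∀ (fuel : Nat) (l cur : List Char) (acc : List (List Char)),
    PySem.Chars.splitOnMax.go ['.'] fuel 0 l cur acc = acc.reverse ++ [cur.reverse ++ l] := by
  intro fuel l cur acc
  cases fuel with
  | zero => simp [PySem.Chars.splitOnMax.go]
  | succ n =>
      cases l with
      | nil => simp [PySem.Chars.splitOnMax.go]
      | cons c rest => simp [PySem.Chars.splitOnMax.go]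

theorem go_max1 : ∀ (fuel : Nat) (l cur : List Char) (acc : List (List Char)),
    l.length < fuel →
    PySem.Chars.splitOnMax.go ['.'] fuel 1 l cur acc = acc.reverse ++ aux1 cur.reverse l := by
  intro fuel
  induction fuel with
  | zero => intro l cur acc h; omega
  | succ n ih =>
      intro l cur acc h
      cases l with
      | nil => simp [PySem.Chars.splitOnMax.go, aux1]
      | cons c rest =>
          simp only [PySem.Chars.splitOnMax.go, List.isPrefixOf, Bool.and_true]
          by_cases hc : c = '.'
          · subst hc
            simp only [beq_self_eq_true, if_true, List.length_cons, List.length_nil,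
              List.drop_succ_cons, List.drop_zero]
            rw [go_max0]
            rw [aux1_dot]
            simp
          · have hbc : ('.' == c) = false := beq_eq_false_iff_ne.mpr (Ne.symm hc)
            simp only [hbc]
            rw [ih rest (c :: cur) acc (Nat.lt_of_succ_lt_succ h)]
            rw [aux1_ne _ _ _ hc]
            simp

theorem splitOnMax1_eq (s : List Char) :
    PySem.Chars.splitOnMax s ['.'] 1 = aux1 [] s := by
  unfold PySem.Chars.splitOnMax
  simp only [show ¬((1 : Int) < 0) by norm_num, if_false, Int.toNat_one]
  simpa using go_max1 (s.length + 1) s [] [] (by omega)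

-- the two split shapes agree: either no '.' (one piece) or the first '.' splits off the head part
theorem aux1_auxSplit : ∀ (s pre : List Char),
    (aux1 pre s = [pre ++ s] ∧ auxSplit pre s = [pre ++ s]) ∨
    (∃ h t, aux1 pre s = [h, t] ∧ auxSplit pre s = h :: auxSplit [] t) := by
  intro s
  induction s with
  | nil => intro pre; left; simp [aux1, auxSplit]
  | cons c rest ih =>
      intro pre
      by_cases hc : c = '.'
      · subst hc
        right
        exact ⟨pre, rest, aux1_dot pre rest, auxSplit_dot pre rest⟩
      · rcases ih (pre ++ [c]) with ⟨h1, h2⟩ | ⟨h, t, h1, h2⟩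
        · left
          constructor
          · rw [aux1_ne _ _ _ hc, h1]; simp
          · rw [auxSplit_ne _ _ _ hc, h2]; simp
        · right
          exact ⟨h, t, by rw [aux1_ne _ _ _ hc, h1], by rw [auxSplit_ne _ _ _ hc, h2]⟩

theorem bump_rec_case (s : List Char) (b : Nat) :
    bump_rec s (b + 1) =
      (if (PySem.Chars.splitOnMax s ['.'] 1).length = 1 then
        if PySem.Chars.strIsdigit s then some (PySem.Int.toChars (pvPyIntC s + 1)) else none
      else
        match PySem.Chars.splitOnMax s ['.'] 1 with
        | [] => none
        | [_] => none
        | head :: tail :: _ =>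
            if PySem.Chars.strIsdigit head then
              match bump_rec tail b with
              | some rest => some (PySem.Int.toChars (pvPyIntC head) ++ '.' :: rest)
              | none => none
            else none) := rfl

-- the reference shape both ports reduce to: validate+format one part per budget step
def bumpF : List (List Char) → Nat → Option (List Char)
  | _, 0 => none
  | [], _ + 1 => none
  | [p], _ + 1 =>
      if PySem.Chars.strIsdigit p then some (PySem.Int.toChars (pvPyIntC p + 1)) else none
  | p :: q :: rest, b + 1 =>
      if PySem.Chars.strIsdigit p then
        match bumpF (q :: rest) b with
        | some r => some (PySem.Int.toChars (pvPyIntC p) ++ '.' :: r)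
        | none => none
      else none

theorem bump_rec_eq (b : Nat) : ∀ s : List Char, bump_rec s b = bumpF (auxSplit [] s) b := by
  induction b with
  | zero =>
      intro s
      simp [bump_rec, bumpF]
  | succ n ih =>
      intro s
      rw [bump_rec_case, splitOnMax1_eq]
      rcases aux1_auxSplit s [] with ⟨h1, h2⟩ | ⟨h, t, h1, h2⟩
      · simp only [List.nil_append] at h1 h2
        rw [h1, h2, if_pos (show ([s] : List (List Char)).length = 1 from rfl)]
        simp [bumpF]
      · rw [h1, h2]
        have hlen : ¬ ([h, t] : List (List Char)).length = 1 := by simp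
        rw [if_neg hlen]
        rcases ht : auxSplit [] t with _ | ⟨q, rest⟩
        · exact absurd ht (auxSplit_ne_nil [] t)
        · simp only [bumpF]
          rw [ih t, ht]

theorem toList_dot : (".":String).toList = ['.'] := rfl

theorem body_eq (ps : List (List Char)) :
    (if !((ps.map String.ofList).all PySem.Str.strIsdigit) then none
     else if (ps.map String.ofList).length = 1 then
       match (ps.map String.ofList).map pvPyInt with
       | [major] => some (PySem.Int.toStr (major + 1))
       | _ => none
     else if (ps.map String.ofList).length = 2 then
       match (ps.map String.ofList).map pvPyInt with
       | [major, minor] =>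
           some (PySem.Str.join "." [PySem.Int.toStr major, PySem.Int.toStr (minor + 1)])
       | _ => none
     else if (ps.map String.ofList).length = 3 then
       match (ps.map String.ofList).map pvPyInt with
       | [major, minor, patch] =>
           some (PySem.Str.join "." [PySem.Int.toStr major, PySem.Int.toStr minor,
                                     PySem.Int.toStr (patch + 1)])
       | _ => none
     else none)
    = Option.map String.ofList (bumpF ps 3) := by
  rcases ps with _ | ⟨p, _ | ⟨q, _ | ⟨r, _ | ⟨w, rest⟩⟩⟩⟩
  · simp [bumpF]
  · simp only [List.map_cons, List.map_nil, List.all_cons, List.all_nil, Bool.and_true,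
      List.length_cons, List.length_nil, bumpF, PySem.Str.strIsdigit_eq, String.toList_ofList,
      pvPyInt, pvPyIntC, PySem.Int.ofStr?_ofList]
    split_ifs with h1 <;> simp_all [PySem.Int.toStr]
  · simp only [List.map_cons, List.map_nil, List.all_cons, List.all_nil, Bool.and_true,
      List.length_cons, List.length_nil, bumpF, PySem.Str.strIsdigit_eq, String.toList_ofList,
      pvPyInt, pvPyIntC, PySem.Int.ofStr?_ofList]
    by_cases hp : PySem.Chars.strIsdigit p <;>
      by_cases hq : PySem.Chars.strIsdigit q <;>
        simp [hp, hq, PySem.Int.toStr, PySem.Str.join, PySem.Chars.join, toList_dot,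
          List.intercalate]
  · simp only [List.map_cons, List.map_nil, List.all_cons, List.all_nil, Bool.and_true,
      List.length_cons, List.length_nil, bumpF, PySem.Str.strIsdigit_eq, String.toList_ofList,
      pvPyInt, pvPyIntC, PySem.Int.ofStr?_ofList]
    by_cases hp : PySem.Chars.strIsdigit p <;>
      by_cases hq : PySem.Chars.strIsdigit q <;>
        by_cases hr : PySem.Chars.strIsdigit r <;>
          simp [hp, hq, hr, PySem.Int.toStr, PySem.Str.join, PySem.Chars.join, toList_dot,
            List.intercalate]
  · simp only [List.map_cons, List.all_cons, List.length_cons, bumpF,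
      PySem.Str.strIsdigit_eq, String.toList_ofList]
    by_cases hp : PySem.Chars.strIsdigit p <;>
      by_cases hq : PySem.Chars.strIsdigit q <;>
        by_cases hr : PySem.Chars.strIsdigit r <;>
          simp [hp, hq, hr]

-- ===== VERDICT (by name: the statement is the Claim_ definition above) =====
theorem bump_version_spec : Claim_equal_bump_version := by
  intro version _
  unfold Spec_bump_version bump_version bump_version_alt
  by_cases hs : PySem.Str.strip version = ""
  · simp [hs]
  · simp only [hs, if_false]
    have hsplit : (PySem.Str.split? (PySem.Str.strip version) ".").getD []
        = (auxSplit [] (PySem.Str.strip version).toList).map String.ofList := by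
      simp [PySem.Str.split?, PySem.Chars.split?, toList_dot, splitOn_eq]
    rw [hsplit, bump_rec_eq]
    exact body_eq (auxSplit [] (PySem.Str.strip version).toList)
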